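-- pv_equiv track=rewrite | github.com/Kanishka-C/100days-Coding-challenge | day89.py | max_steps
-- ===== SOURCE A (Python) =====
-- def max_steps(n, k, c, arr):
--     arr.sort()  # Step 1: Sort the array
--     steps = 0   # Count of valid steps
--     used = [False] * n  # Track if a number is already used in a group
--
--     i = 0  # Pointer to find valid groups
--     while i < n:
--         group = []  # Store elements forming a valid group
--         for j in range(i, n):
--             if not used[j]:  # Pick only unused elements
--                 if len(group) == 0 or arr[j] >= group[-1] * c:
--                     group.append(arr[j])  # Add to the group
--                     used[j] = True  # Mark as used
--                     if len(group) == k:  # If we formed a valid group of K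
--                         steps += 1
--                         break  # Move to the next group
--
--         i += 1  # Move to the next element to start a new group
--
--     return steps
-- ===== SOURCE B (Python) =====
-- def max_steps(n, k, c, arr):
--     # Return-value equivalent to A; like A, sorts arr in place.
--     arr.sort()
--     rem = arr[:n] if n > 0 else []
--     steps = 0
--     while rem:
--         last = rem[0]
--         size = 1
--         nxt = []  # elements left over for the following chains
--         for x in rem[1:]:
--             if size != k and x >= last * c:
--                 last = x
--                 size += 1
--             else:
--                 nxt.append(x)
--         if size == k:
--             steps += 1
--         rem = nxt
--     return steps
-- ===== Notes on version B (the rewrite author's own statement) =====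
-- stated objective: simpler
-- what changed: A runs n outer passes over index arrays (used flags, range(i,n) rescans of already-consumed slots); B keeps one worklist of the still-unused sorted values, pops the head, greedily builds one chain per iteration and rebuilds the worklist from the skipped elements, stopping when it is empty.
-- crash fix: On inputs with n > len(arr) A raises IndexError (used/arr indexed up to n-1); B works on the sorted elements that exist and returns their step count. — e.g. on max_steps(3, 2, 2, [1, 4]): A raises IndexError, B returns 1
import Mathlib
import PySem

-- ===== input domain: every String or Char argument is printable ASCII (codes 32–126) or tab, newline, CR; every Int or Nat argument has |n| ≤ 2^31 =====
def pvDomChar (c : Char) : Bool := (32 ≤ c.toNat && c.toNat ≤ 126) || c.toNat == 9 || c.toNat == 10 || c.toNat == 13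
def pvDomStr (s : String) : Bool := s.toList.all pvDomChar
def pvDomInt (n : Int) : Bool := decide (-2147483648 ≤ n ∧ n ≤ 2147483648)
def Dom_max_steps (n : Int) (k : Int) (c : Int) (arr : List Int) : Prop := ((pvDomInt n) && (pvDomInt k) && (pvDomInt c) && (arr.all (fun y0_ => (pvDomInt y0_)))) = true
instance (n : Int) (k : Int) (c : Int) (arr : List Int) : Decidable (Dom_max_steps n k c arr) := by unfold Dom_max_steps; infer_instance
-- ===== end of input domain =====

-- B replaces A's n outer passes over a used-flags array by a worklist of the still-unused
-- sorted values, rebuilding it from the skipped elements after each greedy chain (objective: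
-- simpler / alternative).  Equivalence is about the RETURN value; like A, the Python B sorts
-- arr in place.

-- ===== PORT A =====
-- inner 'for j in range(i, n)' loop of A; fuel = n - j
def aChain (arr : List Int) (c k : Int) : Nat → Nat → List Bool → List Int → Int → (List Bool × Int)
  | 0, _j, used, _group, steps => (used, steps)
  | fuel+1, j, used, group, steps =>
    if used.getD j false then
      aChain arr c k fuel (j+1) used group steps
    else if group.isEmpty || decide (arr.getD j 0 ≥ group.getLast?.getD 0 * c) then
      if (((group ++ [arr.getD j 0]).length : Int)) = k then (used.set j true, steps + 1)
      else aChain arr c k fuel (j+1) (used.set j true) (group ++ [arr.getD j 0]) steps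
    else
      aChain arr c k fuel (j+1) used group steps

-- outer 'while i < n' loop of A; second Nat argument is the remaining iteration count n - i
def aOuter (arr : List Int) (c k : Int) (nn : Nat) : Nat → Nat → List Bool → Int → Int
  | _i, 0, _used, steps => steps
  | i, t+1, used, steps =>
    let r := aChain arr c k (nn - i) i used [] steps
    aOuter arr c k nn (i+1) t r.1 r.2

def max_steps (n : Int) (k : Int) (c : Int) (arr : List Int) : Int :=
  let arr' := PySem.List.sorted arr (fun x => x) false
  let nn := n.toNat
  aOuter arr' c k nn 0 nn (List.replicate nn false) 0

-- ===== PORT B =====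
-- inner 'for x in rem[1:]' loop of Source B; returns (size, nxt)
def bInner (c k : Int) : List Int → Int → Int → List Int → Int × List Int
  | [], _last, size, nxt => (size, nxt)
  | x :: tl, last, size, nxt =>
    if size ≠ k ∧ x ≥ last * c then bInner c k tl x (size + 1) nxt
    else bInner c k tl last size (nxt ++ [x])

-- needed only so that Lean accepts bLoop's termination (rem shrinks each iteration)
lemma bInner_len (c k : Int) : ∀ (rest : List Int) (last size : Int) (nxt : List Int),
    (bInner c k rest last size nxt).2.length ≤ rest.length + nxt.length := by
  intro rest
  induction rest with
  | nil => intro last size nxt; simp [bInner]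
  | cons x tl ih =>
    intro last size nxt
    simp only [bInner]
    split
    · have := ih x (size + 1) nxt; simp at this ⊢; omega
    · have := ih last size (nxt ++ [x]); simp at this ⊢; omega

-- outer 'while rem' loop of Source B
def bLoop (c k : Int) : List Int → Int → Int
  | [], steps => steps
  | x :: rest, steps =>
    let r := bInner c k rest x 1 []
    bLoop c k r.2 (if r.1 = k then steps + 1 else steps)
  termination_by rem _ => rem.length
  decreasing_by
    have := bInner_len c k rest x 1 []
    simp at this ⊢; omega

def max_steps_alt (n : Int) (k : Int) (c : Int) (arr : List Int) : Int :=
  let arr' := PySem.List.sorted arr (fun x => x) false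
  let rem := if 0 < n then arr'.take n.toNat else []
  bLoop c k rem 0

-- ===== PRECONDITION & SPEC =====
-- A evaluates arr[j] for every j < n, so it raises IndexError exactly when n > len(arr);
-- Pre_ excludes precisely those inputs (B returns a value there, see Raises_ below).
def Pre_max_steps (n : Int) (_k : Int) (_c : Int) (arr : List Int) : Prop := n ≤ (arr.length : Int)
instance (n : Int) (k : Int) (c : Int) (arr : List Int) : Decidable (Pre_max_steps n k c arr) := by unfold Pre_max_steps; infer_instance
def pvWitness_max_steps : Int × Int × Int × List Int := (3, 2, 2, [1, 2, 4])

-- On inputs with n > len(arr) A raises IndexError while B works on the sorted elements that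
-- exist and returns their step count.
def Raises_max_steps (n : Int) (_k : Int) (_c : Int) (arr : List Int) : Prop := (arr.length : Int) < n
instance (n : Int) (k : Int) (c : Int) (arr : List Int) : Decidable (Raises_max_steps n k c arr) := by unfold Raises_max_steps; infer_instance
def pvRaiseWitness_max_steps : Int × Int × Int × List Int := (3, 2, 2, [1, 4])
def pvRaiseWitnessOut_max_steps : Int := 1

def Spec_max_steps (n : Int) (k : Int) (c : Int) (arr : List Int) (out : Int) : Prop := out = max_steps_alt n k c arr
instance (n : Int) (k : Int) (c : Int) (arr : List Int) (out : Int) : Decidable (Spec_max_steps n k c arr out) := by unfold Spec_max_steps; infer_instance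

-- ===== CLAIM (what is proved, stated in full; the proofs are below) =====
def Claim_equal_max_steps : Prop := ∀ (n : Int) (k : Int) (c : Int) (arr : List Int), Dom_max_steps n k c arr → Pre_max_steps n k c arr → Spec_max_steps n k c arr (max_steps n k c arr)
def Claim_raises_max_steps : Prop := (∀ (n : Int) (k : Int) (c : Int) (arr : List Int), Dom_max_steps n k c arr → Raises_max_steps n k c arr → ¬ Pre_max_steps n k c arr) ∧ (Dom_max_steps (pvRaiseWitness_max_steps.1) (pvRaiseWitness_max_steps.2.1) (pvRaiseWitness_max_steps.2.2.1) (pvRaiseWitness_max_steps.2.2.2) ∧ Raises_max_steps (pvRaiseWitness_max_steps.1) (pvRaiseWitness_max_steps.2.1) (pvRaiseWitness_max_steps.2.2.1) (pvRaiseWitness_max_steps.2.2.2) ∧ max_steps_alt (pvRaiseWitness_max_steps.1) (pvRaiseWitness_max_steps.2.1) (pvRaiseWitness_max_steps.2.2.1) (pvRaiseWitness_max_steps.2.2.2) = pvRaiseWitnessOut_max_steps)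

-- ===== LEMMAS AND PROOFS =====

-- the sorted values at the still-unused indices j, j+1, …, j+fuel-1
def uvals (arr : List Int) (used : List Bool) : Nat → Nat → List Int
  | _, 0 => []
  | j, fuel+1 => (if used.getD j false then [] else [arr.getD j 0]) ++ uvals arr used (j+1) fuel

lemma getD_set_ne (l : List Bool) (i j : Nat) (b : Bool) (h : i ≠ j) :
    (l.set i b).getD j false = l.getD j false := by
  simp [List.getD_eq_getElem?_getD, List.getElem?_set_ne h]

lemma getD_set_self (l : List Bool) (j : Nat) (b : Bool) (h : j < l.length) :
    (l.set j b).getD j false = b := by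
  simp [List.getD_eq_getElem?_getD, h]

lemma uvals_set_lt (arr : List Int) (used : List Bool) (i : Nat) (b : Bool) :
    ∀ (fuel j : Nat), i < j → uvals arr (used.set i b) j fuel = uvals arr used j fuel := by
  intro fuel
  induction fuel with
  | zero => intro j _; rfl
  | succ f ih =>
    intro j hij
    simp only [uvals, getD_set_ne used i j b (Nat.ne_of_lt hij), ih (j+1) (Nat.lt_succ_of_lt hij)]

-- proof-side recursive form of a single greedy chain: (final size, untouched rest, skipped)
def bChainSpec (c k : Int) : List Int → Int → Int → List Int → Int × List Int × List Int
  | [], _last, size, skipped => (size, [], skipped)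
  | x :: tl, last, size, skipped =>
    if size = k then (size, x :: tl, skipped)
    else if x ≥ last * c then bChainSpec c k tl x (size + 1) skipped
    else bChainSpec c k tl last size (skipped ++ [x])

lemma bChainSpec_stop (c k : Int) (rest : List Int) (last size : Int) (skipped : List Int)
    (h : size = k) : bChainSpec c k rest last size skipped = (size, rest, skipped) := by
  cases rest <;> simp [bChainSpec, h]

lemma bChainSpec_acc (c k : Int) : ∀ (rest : List Int) (last size : Int) (skipped : List Int),
    bChainSpec c k rest last size skipped
      = ((bChainSpec c k rest last size []).1, (bChainSpec c k rest last size []).2.1,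
         skipped ++ (bChainSpec c k rest last size []).2.2) := by
  intro rest
  induction rest with
  | nil => intro last size skipped; simp [bChainSpec]
  | cons x tl ih =>
    intro last size skipped
    simp only [bChainSpec]
    split
    · simp
    · split
      · exact ih x (size + 1) skipped
      · rw [ih last size (skipped ++ [x]), ih last size ([] ++ [x])]
        simp

-- unfolding helpers for the two loop bodies
lemma uvals_used (arr : List Int) (used : List Bool) (j f : Nat)
    (hu : used.getD j false = true) : uvals arr used j (f+1) = uvals arr used (j+1) f := by
  simp only [uvals]; rw [if_pos hu]; simp

lemma uvals_unused (arr : List Int) (used : List Bool) (j f : Nat)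
    (hu : used.getD j false = false) :
    uvals arr used j (f+1) = arr.getD j 0 :: uvals arr used (j+1) f := by
  simp only [uvals]; rw [if_neg (by rw [hu]; simp)]; simp

lemma aChain_skip (arr : List Int) (c k : Int) (f j : Nat) (used : List Bool)
    (group : List Int) (steps : Int) (hu : used.getD j false = true) :
    aChain arr c k (f+1) j used group steps = aChain arr c k f (j+1) used group steps := by
  simp only [aChain]; rw [if_pos hu]

lemma aChain_take_done (arr : List Int) (c k : Int) (f j : Nat) (used : List Bool)
    (group : List Int) (steps : Int) (hu : used.getD j false = false)
    (hcond : (group.isEmpty || decide (arr.getD j 0 ≥ group.getLast?.getD 0 * c)) = true)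
    (hk1 : (((group ++ [arr.getD j 0]).length : Int)) = k) :
    aChain arr c k (f+1) j used group steps = (used.set j true, steps + 1) := by
  simp only [aChain]; rw [if_neg (by rw [hu]; simp), if_pos hcond, if_pos hk1]

lemma aChain_take_go (arr : List Int) (c k : Int) (f j : Nat) (used : List Bool)
    (group : List Int) (steps : Int) (hu : used.getD j false = false)
    (hcond : (group.isEmpty || decide (arr.getD j 0 ≥ group.getLast?.getD 0 * c)) = true)
    (hk1 : (((group ++ [arr.getD j 0]).length : Int)) ≠ k) :
    aChain arr c k (f+1) j used group steps
      = aChain arr c k f (j+1) (used.set j true) (group ++ [arr.getD j 0]) steps := by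
  simp only [aChain]; rw [if_neg (by rw [hu]; simp), if_pos hcond, if_neg hk1]

lemma aChain_below (arr : List Int) (c k : Int) (f j : Nat) (used : List Bool)
    (group : List Int) (steps : Int) (hu : used.getD j false = false)
    (hcond : (group.isEmpty || decide (arr.getD j 0 ≥ group.getLast?.getD 0 * c)) = false) :
    aChain arr c k (f+1) j used group steps = aChain arr c k f (j+1) used group steps := by
  simp only [aChain]; rw [if_neg (by rw [hu]; simp), if_neg (by rw [hcond]; simp)]

lemma bInner_done (c k : Int) : ∀ (rest : List Int) (last : Int) (nxt : List Int),
    bInner c k rest last k nxt = (k, nxt ++ rest) := by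
  intro rest
  induction rest with
  | nil => intro last nxt; simp [bInner]
  | cons x tl ih =>
    intro last nxt
    simp only [bInner, ne_eq, not_true_eq_false, false_and, if_false]
    rw [ih last (nxt ++ [x])]
    simp

-- the port's one-pass partition computes exactly the recursive chain's (size, skipped ++ rest)
lemma bInner_eq_spec (c k : Int) : ∀ (rest : List Int) (last size : Int) (nxt : List Int),
    bInner c k rest last size nxt
      = ((bChainSpec c k rest last size []).1,
         nxt ++ (bChainSpec c k rest last size []).2.2 ++ (bChainSpec c k rest last size []).2.1) := by
  intro rest
  induction rest with
  | nil => intro last size nxt; simp [bInner, bChainSpec]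
  | cons x tl ih =>
    intro last size nxt
    by_cases hsz : size = k
    · rw [hsz]
      rw [bInner_done c k (x :: tl) last nxt]
      simp [bChainSpec]
    · simp only [bInner, bChainSpec, if_neg hsz]
      by_cases hge : x ≥ last * c
      · rw [if_pos ⟨hsz, hge⟩, if_pos hge]
        exact ih x (size + 1) nxt
      · rw [if_neg (by tauto), if_neg hge]
        rw [ih last size (nxt ++ [x]), bChainSpec_acc c k tl last size ([] ++ [x])]
        simp

lemma innerLemma (arr : List Int) (c k : Int) :
    ∀ (fuel j : Nat) (used : List Bool) (group : List Int) (steps : Int),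
    used.length = j + fuel → group ≠ [] → (group.length : Int) ≠ k →
    (aChain arr c k fuel j used group steps).2
      = steps + (if (bChainSpec c k (uvals arr used j fuel) (group.getLast?.getD 0) (group.length : Int) []).1 = k then 1 else 0)
    ∧ uvals arr (aChain arr c k fuel j used group steps).1 j fuel
      = (bChainSpec c k (uvals arr used j fuel) (group.getLast?.getD 0) (group.length : Int) []).2.2
        ++ (bChainSpec c k (uvals arr used j fuel) (group.getLast?.getD 0) (group.length : Int) []).2.1
    ∧ (aChain arr c k fuel j used group steps).1.length = used.length
    ∧ (∀ m, m < j → (aChain arr c k fuel j used group steps).1.getD m false = used.getD m false)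
    ∧ (∀ m, used.getD m false = true → (aChain arr c k fuel j used group steps).1.getD m false = true) := by
  intro fuel
  induction fuel with
  | zero =>
    intro j used group steps hlen hg hk
    refine ⟨?_, ?_, rfl, fun m _ => rfl, fun m h => h⟩
    · simp only [aChain, uvals, bChainSpec]; simp [hk]
    · simp [uvals, bChainSpec]
  | succ f ih =>
    intro j used group steps hlen hg hk
    have hjlt : j < used.length := by omega
    by_cases hu : used.getD j false = true
    · -- index j already used: A skips it, it does not occur in uvals
      rw [aChain_skip arr c k f j used group steps hu, uvals_used arr used j f hu]
      obtain ⟨i1, i2, i3, i4, i5⟩ := ih (j+1) used group steps (by omega) hg hk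
      refine ⟨i1, ?_, i3, fun m hm => i4 m (by omega), i5⟩
      have hj : (aChain arr c k f (j+1) used group steps).1.getD j false = true := by
        rw [i4 j (by omega)]; exact hu
      rw [uvals_used arr _ j f hj]
      exact i2
    · have hu' : used.getD j false = false := by simpa using hu
      have hx := uvals_unused arr used j f hu'
      have hge : group.isEmpty = false := by simpa using hg
      by_cases hc : arr.getD j 0 ≥ group.getLast?.getD 0 * c
      · -- A adds arr[j] to the group; B consumes the head of the worklist
        have hcond : (group.isEmpty || decide (arr.getD j 0 ≥ group.getLast?.getD 0 * c)) = true := by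
          simp only [hge, Bool.false_or, decide_eq_true_eq]; exact hc
        have hBstep : bChainSpec c k (uvals arr used j (f+1)) (group.getLast?.getD 0) (group.length : Int) []
            = bChainSpec c k (uvals arr used (j+1) f) (arr.getD j 0) ((group.length : Int) + 1) [] := by
          rw [hx]; simp only [bChainSpec]; rw [if_neg hk, if_pos hc]
        have hsz : (((group ++ [arr.getD j 0]).length : Int)) = (group.length : Int) + 1 := by
          simp
        by_cases hk1 : ((group.length : Int) + 1) = k
        · -- the group is completed at index j
          rw [aChain_take_done arr c k f j used group steps hu' hcond (by rw [hsz]; exact hk1)]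
          rw [hBstep, bChainSpec_stop c k _ _ _ _ hk1]
          have hjt : (used.set j true).getD j false = true := getD_set_self used j true hjlt
          refine ⟨by simp [hk1], ?_, by simp, ?_, ?_⟩
          · rw [uvals_used arr _ j f hjt, uvals_set_lt arr used j true f (j+1) (by omega)]
            simp
          · intro m hm; exact getD_set_ne used j m true (by omega)
          · intro m hm
            by_cases hmj : m = j
            · subst hmj; exact getD_set_self used m true hjlt
            · rw [getD_set_ne used j m true (fun h => hmj h.symm)]; exact hm
        · -- the group grows and the scan continues
          rw [aChain_take_go arr c k f j used group steps hu' hcond (by rw [hsz]; exact hk1)]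
          obtain ⟨i1, i2, i3, i4, i5⟩ := ih (j+1) (used.set j true) (group ++ [arr.getD j 0]) steps
            (by simp; omega) (by simp) (by rw [hsz]; exact hk1)
          have hlast : ((group ++ [arr.getD j 0]).getLast?.getD 0) = arr.getD j 0 := by simp
          have huv : uvals arr (used.set j true) (j+1) f = uvals arr used (j+1) f :=
            uvals_set_lt arr used j true f (j+1) (by omega)
          rw [hlast, hsz, huv] at i1 i2
          rw [hBstep]
          refine ⟨i1, ?_, by rw [i3]; simp, ?_, ?_⟩
          · have hjt : (aChain arr c k f (j+1) (used.set j true) (group ++ [arr.getD j 0]) steps).1.getD j false = true := by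
              rw [i4 j (by omega)]; exact getD_set_self used j true hjlt
            rw [uvals_used arr _ j f hjt]
            exact i2
          · intro m hm
            rw [i4 m (by omega)]; exact getD_set_ne used j m true (by omega)
          · intro m hm
            apply i5
            by_cases hmj : m = j
            · subst hmj; exact getD_set_self used m true hjlt
            · rw [getD_set_ne used j m true (fun h => hmj h.symm)]; exact hm
      · -- arr[j] is below the threshold: A leaves it unused, B moves it to skipped
        have hcond : (group.isEmpty || decide (arr.getD j 0 ≥ group.getLast?.getD 0 * c)) = false := by
          simp only [hge, Bool.false_or]; exact decide_eq_false hc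
        rw [aChain_below arr c k f j used group steps hu' hcond]
        obtain ⟨i1, i2, i3, i4, i5⟩ := ih (j+1) used group steps (by omega) hg hk
        have hB : bChainSpec c k (uvals arr used j (f+1)) (group.getLast?.getD 0) (group.length : Int) []
            = ((bChainSpec c k (uvals arr used (j+1) f) (group.getLast?.getD 0) (group.length : Int) []).1,
               (bChainSpec c k (uvals arr used (j+1) f) (group.getLast?.getD 0) (group.length : Int) []).2.1,
               arr.getD j 0 :: (bChainSpec c k (uvals arr used (j+1) f) (group.getLast?.getD 0) (group.length : Int) []).2.2) := by
          rw [hx]; simp only [bChainSpec]; rw [if_neg hk, if_neg hc]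
          rw [bChainSpec_acc c k (uvals arr used (j+1) f) (group.getLast?.getD 0) (group.length : Int) ([] ++ [arr.getD j 0])]
          simp
        rw [hB]
        refine ⟨i1, ?_, i3, fun m hm => i4 m (by omega), i5⟩
        have hjf : (aChain arr c k f (j+1) used group steps).1.getD j false = false := by
          rw [i4 j (by omega)]; exact hu'
        rw [uvals_unused arr _ j f hjf, i2]
        simp

lemma emptyNil (arr : List Int) (c k : Int) :
    ∀ (fuel j : Nat) (used : List Bool) (steps : Int),
    uvals arr used j fuel = [] →
    aChain arr c k fuel j used [] steps = (used, steps) := by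
  intro fuel
  induction fuel with
  | zero => intro j used steps _; rfl
  | succ f ih =>
    intro j used steps h
    by_cases hu : used.getD j false = true
    · rw [aChain_skip arr c k f j used [] steps hu]
      exact ih (j+1) used steps (by rw [← uvals_used arr used j f hu]; exact h)
    · have hu' : used.getD j false = false := by simpa using hu
      rw [uvals_unused arr used j f hu'] at h
      exact absurd h (by simp)

lemma emptyCons (arr : List Int) (c k : Int) :
    ∀ (fuel j : Nat) (used : List Bool) (steps : Int) (x : Int) (rest : List Int),
    used.length = j + fuel → uvals arr used j fuel = x :: rest →
    (aChain arr c k fuel j used [] steps).2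
      = steps + (if (bChainSpec c k rest x 1 []).1 = k then 1 else 0)
    ∧ uvals arr (aChain arr c k fuel j used [] steps).1 j fuel
      = (bChainSpec c k rest x 1 []).2.2 ++ (bChainSpec c k rest x 1 []).2.1
    ∧ (aChain arr c k fuel j used [] steps).1.length = used.length
    ∧ (∀ m, m < j → (aChain arr c k fuel j used [] steps).1.getD m false = used.getD m false)
    ∧ (∀ m, used.getD m false = true → (aChain arr c k fuel j used [] steps).1.getD m false = true)
    ∧ (aChain arr c k fuel j used [] steps).1.getD j false = true := by
  intro fuel
  induction fuel with
  | zero => intro j used steps x rest _ h; simp [uvals] at h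
  | succ f ih =>
    intro j used steps x rest hlen h
    have hjlt : j < used.length := by omega
    by_cases hu : used.getD j false = true
    · rw [aChain_skip arr c k f j used [] steps hu]
      obtain ⟨i1, i2, i3, i4, i5, i6⟩ := ih (j+1) used steps x rest (by omega)
        (by rw [← uvals_used arr used j f hu]; exact h)
      have hjt : (aChain arr c k f (j+1) used [] steps).1.getD j false = true := by
        rw [i4 j (by omega)]; exact hu
      refine ⟨i1, ?_, i3, fun m hm => i4 m (by omega), i5, hjt⟩
      rw [uvals_used arr _ j f hjt]
      exact i2
    · have hu' : used.getD j false = false := by simpa using hu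
      have hx := uvals_unused arr used j f hu'
      rw [hx] at h
      have hxv : arr.getD j 0 = x := (List.cons.injEq _ _ _ _ ▸ h).1
      have hrest : uvals arr used (j+1) f = rest := (List.cons.injEq _ _ _ _ ▸ h).2
      have hcond : (([] : List Int).isEmpty || decide (arr.getD j 0 ≥ ([] : List Int).getLast?.getD 0 * c)) = true := by
        simp
      have hsz : ((([] ++ [arr.getD j 0] : List Int).length : Int)) = 1 := by simp
      by_cases hk1 : (1 : Int) = k
      · -- a chain of length k = 1 is completed immediately
        rw [aChain_take_done arr c k f j used [] steps hu' hcond (by rw [hsz]; exact hk1)]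
        rw [bChainSpec_stop c k rest x 1 [] hk1]
        have hjt : (used.set j true).getD j false = true := getD_set_self used j true hjlt
        refine ⟨by simp [hk1], ?_, by simp, ?_, ?_, hjt⟩
        · rw [uvals_used arr _ j f hjt, uvals_set_lt arr used j true f (j+1) (by omega), hrest]
          simp
        · intro m hm; exact getD_set_ne used j m true (by omega)
        · intro m hm
          by_cases hmj : m = j
          · subst hmj; exact getD_set_self used m true hjlt
          · rw [getD_set_ne used j m true (fun hh => hmj hh.symm)]; exact hm
      · -- the chain starts with x and the scan continues
        rw [aChain_take_go arr c k f j used [] steps hu' hcond (by rw [hsz]; exact hk1)]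
        simp only [List.nil_append, hxv]
        obtain ⟨i1, i2, i3, i4, i5⟩ := innerLemma arr c k f (j+1) (used.set j true) [x] steps
          (by simp; omega) (by simp) (by simpa using fun hh => hk1 hh)
        have huv : uvals arr (used.set j true) (j+1) f = rest := by
          rw [uvals_set_lt arr used j true f (j+1) (by omega)]; exact hrest
        rw [huv] at i1 i2
        simp only [List.getLast?_singleton, Option.getD_some, List.length_singleton, Nat.cast_one] at i1 i2
        have hjt : (aChain arr c k f (j+1) (used.set j true) [x] steps).1.getD j false = true := by
          rw [i4 j (by omega)]; exact getD_set_self used j true hjlt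
        refine ⟨i1, ?_, by rw [i3]; simp, ?_, ?_, hjt⟩
        · rw [uvals_used arr _ j f hjt]
          exact i2
        · intro m hm
          rw [i4 m (by omega)]; exact getD_set_ne used j m true (by omega)
        · intro m hm
          apply i5
          by_cases hmj : m = j
          · subst hmj; exact getD_set_self used m true hjlt
          · rw [getD_set_ne used j m true (fun hh => hmj hh.symm)]; exact hm

lemma outerLemma (arr : List Int) (c k : Int) (nn : Nat) :
    ∀ (t i : Nat) (used : List Bool) (steps : Int),
    i + t = nn → used.length = nn → (∀ m, m < i → used.getD m false = true) →
    aOuter arr c k nn i t used steps = bLoop c k (uvals arr used i t) steps := by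
  intro t
  induction t with
  | zero =>
    intro i used steps _ _ _
    simp only [aOuter, uvals, bLoop]
  | succ t ih =>
    intro i used steps hit hlen hinv
    have hfuel : nn - i = t + 1 := by omega
    have hstep : aOuter arr c k nn i (t+1) used steps
        = aOuter arr c k nn (i+1) t (aChain arr c k (t+1) i used [] steps).1
            (aChain arr c k (t+1) i used [] steps).2 := by
      simp only [aOuter, hfuel]
    cases hcase : uvals arr used i (t+1) with
    | nil =>
      have hnil : aChain arr c k (t+1) i used [] steps = (used, steps) :=
        emptyNil arr c k (t+1) i used steps hcase
      have hui : used.getD i false = true := by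
        by_contra hcon
        have hcon' : used.getD i false = false := by simpa using hcon
        rw [uvals_unused arr used i t hcon'] at hcase
        exact absurd hcase (by simp)
      have htail : uvals arr used (i+1) t = [] := by
        rw [← uvals_used arr used i t hui]; exact hcase
      rw [hstep, hnil]
      rw [ih (i+1) used steps (by omega) hlen (fun m hm => by
        by_cases hmi : m = i
        · subst hmi; exact hui
        · exact hinv m (by omega))]
      rw [htail]
    | cons x rest =>
      obtain ⟨e1, e2, e3, e4, e5, e6⟩ := emptyCons arr c k (t+1) i used steps x rest (by omega) hcase
      have htail : uvals arr (aChain arr c k (t+1) i used [] steps).1 (i+1) t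
          = (bChainSpec c k rest x 1 []).2.2 ++ (bChainSpec c k rest x 1 []).2.1 := by
        rw [← uvals_used arr _ i t e6]; exact e2
      rw [hstep]
      rw [ih (i+1) (aChain arr c k (t+1) i used [] steps).1 (aChain arr c k (t+1) i used [] steps).2
        (by omega) (by rw [e3]; exact hlen) (fun m hm => by
          by_cases hmi : m = i
          · subst hmi; exact e6
          · rw [e4 m (by omega)]; exact hinv m (by omega))]
      rw [htail, e1]
      rw [bLoop]
      rw [bInner_eq_spec c k rest x 1 []]
      simp only [List.nil_append]
      congr 1
      split <;> simp

lemma uvals_replicate (arr : List Int) (m : Nat) :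
    ∀ (fuel j : Nat), j + fuel ≤ arr.length →
    uvals arr (List.replicate m false) j fuel = (arr.drop j).take fuel := by
  intro fuel
  induction fuel with
  | zero => intro j _; simp [uvals]
  | succ f ih =>
    intro j h
    have hj : j < arr.length := by omega
    have hrep : (List.replicate m false).getD j false = false := by
      simp [List.getD_eq_getElem?_getD, List.getElem?_replicate]; split <;> simp
    rw [uvals_unused arr _ j f hrep, List.drop_eq_getElem_cons hj, List.take_succ_cons,
      ih (j+1) (by omega)]
    congr 1
    simp [List.getD_eq_getElem?_getD, List.getElem?_eq_getElem hj]

-- ===== VERDICT (by name: the statement is the Claim_ definition above) =====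
theorem max_steps_spec : Claim_equal_max_steps := by
  intro n k c arr _ hpre
  unfold Spec_max_steps max_steps max_steps_alt
  unfold Pre_max_steps at hpre
  by_cases hn : 0 < n
  · have hnn : n.toNat ≤ (PySem.List.sorted arr (fun x => x) false).length := by
      rw [PySem.List.length_sorted]; omega
    rw [outerLemma (PySem.List.sorted arr (fun x => x) false) c k n.toNat n.toNat 0
      (List.replicate n.toNat false) 0 (by omega) (by simp) (fun m hm => absurd hm (Nat.not_lt_zero m))]
    rw [uvals_replicate _ n.toNat n.toNat 0 (by omega)]
    simp [hn]
  · have h0 : n.toNat = 0 := Int.toNat_of_nonpos (by omega)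
    rw [h0]
    simp only [aOuter, if_neg hn, bLoop]

theorem max_steps_raises : Claim_raises_max_steps := by
  unfold Claim_raises_max_steps
  constructor
  · intro n k c arr _ hr hp
    exact absurd hp (by unfold Pre_max_steps; unfold Raises_max_steps at hr; omega)
  · refine ⟨by decide, by decide, ?_⟩
    show max_steps_alt 3 2 2 [1, 4] = 1
    have h : max_steps_alt 3 2 2 [1, 4] = bLoop 2 2 [1, 4] 0 := by
      norm_num [max_steps_alt, PySem.List.sorted, PySem.List.insertBy]
      rfl
    rw [h, bLoop]; norm_num [bInner]; rw [bLoop]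

-- self-check: via the crash-fix theorem, the raise witness indeed falls outside Pre_
theorem pvRaiseWitness_max_steps_ok : ¬ Pre_max_steps 3 2 2 [1, 4] := by
  have h := max_steps_raises
  unfold Claim_raises_max_steps at h
  exact h.1 3 2 2 [1, 4] (by decide) h.2.2.1
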